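-- pv_equiv track=rewrite | github.com/koehnden/dragon-lens | src/services/extraction/product_consolidation.py | strip_brand_prefixes
-- ===== SOURCE A (Python) =====
-- MIN_BRAND_LENGTH = 2
--
-- MIN_STRIPPED_LENGTH = 2
--
-- MIN_REMAINDER_LENGTH = 3
--
-- def strip_brand_prefixes(
--     product_aliases: dict[str, str],
--     product_brand_map: dict[str, str],
--     reverse_brand_map: dict[str, str],
-- ) -> tuple[dict[str, str], dict[str, str]]:
--     updated_aliases = dict(product_aliases)
--     updated_map = dict(product_brand_map)
--     brand_names = sorted(reverse_brand_map.keys(), key=len, reverse=True)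
--
--     for product in set(updated_aliases.values()):
--         stripped, brand = try_strip_brand(product, brand_names, reverse_brand_map)
--         if stripped and len(stripped) >= MIN_STRIPPED_LENGTH:
--             updated_aliases[product] = stripped
--             updated_map.setdefault(stripped, brand)
--
--     return updated_aliases, updated_map
--
-- def try_strip_brand(
--     product: str,
--     brand_names: list[str],
--     reverse_brand_map: dict[str, str],
-- ) -> tuple[str | None, str | None]:
--     for brand_name in brand_names:
--         if len(brand_name) < MIN_BRAND_LENGTH:
--             continue
--         if not product.startswith(brand_name):
--             continue
--         remainder = product[len(brand_name):].lstrip(" -·")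
--         if remainder and remainder != product and _is_valid_remainder(remainder):
--             return remainder, reverse_brand_map[brand_name]
--     return None, None
--
-- def _is_valid_remainder(remainder: str) -> bool:
--     if len(remainder) < MIN_REMAINDER_LENGTH:
--         return False
--     return any(c.isalpha() for c in remainder[:3])
-- ===== SOURCE B (Python) =====
-- MIN_BRAND_LENGTH = 2
--
-- MIN_STRIPPED_LENGTH = 2
--
-- MIN_REMAINDER_LENGTH = 3
--
-- def strip_brand_prefixes(product_aliases, product_brand_map, reverse_brand_map):
--     updated_aliases = dict(product_aliases)
--     updated_map = dict(product_brand_map)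
--     max_len = max(map(len, reverse_brand_map), default=0)
--
--     for product in dict.fromkeys(updated_aliases.values()):
--         hit = _longest_valid_strip(product, max_len, reverse_brand_map)
--         if hit is not None:
--             stripped, brand = hit
--             updated_aliases[product] = stripped
--             if stripped not in updated_map:
--                 updated_map[stripped] = brand
--
--     return updated_aliases, updated_map
--
-- def _longest_valid_strip(product, max_len, reverse_brand_map):
--     # walk candidate prefix lengths from longest to shortest; a prefix of a
--     # given length is unique, so the first hit is the longest valid brand
--     for length in range(min(len(product), max_len), MIN_BRAND_LENGTH - 1, -1):
--         brand_name = product[:length]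
--         if brand_name not in reverse_brand_map:
--             continue
--         remainder = product[length:].lstrip(" -·")
--         if len(remainder) >= MIN_REMAINDER_LENGTH and any(c.isalpha() for c in remainder[:3]):
--             return remainder, reverse_brand_map[brand_name]
--     return None
-- ===== Notes on version B (the rewrite author's own statement) =====
-- stated objective: faster
-- what changed: Instead of sorting all brand names by length and scanning the whole brand list per product, B walks each product's own prefix lengths from longest to shortest and tests each prefix by one dict lookup (a prefix of a given length is unique, so the first hit is A's longest valid brand), making the per-product cost depend on the product length, not the number of brands.
import Mathlib
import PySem

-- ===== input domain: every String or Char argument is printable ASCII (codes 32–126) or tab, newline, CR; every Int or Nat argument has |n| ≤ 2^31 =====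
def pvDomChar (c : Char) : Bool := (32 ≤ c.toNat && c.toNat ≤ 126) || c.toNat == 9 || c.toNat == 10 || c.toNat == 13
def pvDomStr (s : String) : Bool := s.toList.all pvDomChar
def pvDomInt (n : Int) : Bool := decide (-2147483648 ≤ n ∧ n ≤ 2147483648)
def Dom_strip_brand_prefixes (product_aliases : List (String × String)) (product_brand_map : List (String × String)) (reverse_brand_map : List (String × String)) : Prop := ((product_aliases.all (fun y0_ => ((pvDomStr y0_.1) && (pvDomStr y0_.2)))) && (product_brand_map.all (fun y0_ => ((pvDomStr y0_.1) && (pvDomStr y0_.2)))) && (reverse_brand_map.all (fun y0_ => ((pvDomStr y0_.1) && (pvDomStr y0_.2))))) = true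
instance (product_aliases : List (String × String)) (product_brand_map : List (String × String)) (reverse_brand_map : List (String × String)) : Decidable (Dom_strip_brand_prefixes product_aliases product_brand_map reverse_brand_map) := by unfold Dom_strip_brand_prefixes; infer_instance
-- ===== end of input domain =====

-- B replaces A's sort-all-brands-then-scan search by a per-product longest-prefix descent with
-- one dict lookup per candidate length (objective: faster). Both ports iterate the distinct
-- products in first-occurrence order; the Python-set-iteration-order-dependent corner is
-- excluded by Pre_. Equality is about return values (the Pythons mutate only local copies).

-- ===== PORT A =====
-- the characters of .lstrip(" -·"); PySem has no lstrip-with-chars, hand-ported (exact): drop the leading run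
def pvSep (c : Char) : Bool := c == ' ' || c == '-' || c == '·'

def pvIsValidRemainder (remainder : List Char) : Bool :=
  if remainder.length < 3 then false
  else (remainder.take 3).any PySem.Chars.isalpha

-- try_strip_brand; Python's (None, None) / (str, str) result pair is encoded as Option (String × String)
def pvTryStripBrand (product : List Char) (brand_names : List String)
    (reverse_brand_map : PySem.Dict String String) : Option (String × String) :=
  match brand_names with
  | [] => none
  | brand_name :: rest =>
    if brand_name.toList.length < 2 then pvTryStripBrand product rest reverse_brand_map
    else if !(PySem.Chars.startswith product brand_name.toList) then
      pvTryStripBrand product rest reverse_brand_map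
    else
      let remainder := (product.drop brand_name.toList.length).dropWhile pvSep
      if remainder ≠ [] ∧ remainder ≠ product ∧ pvIsValidRemainder remainder then
        -- reverse_brand_map[brand_name]: brand_name ∈ keys here, so the lookup always hits
        some (String.ofList remainder, (reverse_brand_map.get? brand_name).getD "")
      else pvTryStripBrand product rest reverse_brand_map

def strip_brand_prefixes (product_aliases : List (String × String)) (product_brand_map : List (String × String)) (reverse_brand_map : List (String × String)) : (List (String × String)) × (List (String × String)) :=
  let updated_aliases := PySem.Dict.ofList product_aliases
  let updated_map := PySem.Dict.ofList product_brand_map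
  let rmap := PySem.Dict.ofList reverse_brand_map
  let brand_names := PySem.List.sorted rmap.keys (fun s => s.toList.length) true
  -- for product in set(updated_aliases.values()): first-occurrence order (the mapping is order-independent under Pre_)
  let st := (PySem.Set.ofList updated_aliases.values).foldl
    (fun st product =>
      match pvTryStripBrand product.toList brand_names rmap with
      | some (stripped, brand) =>
          if stripped.toList ≠ [] ∧ 2 ≤ stripped.toList.length then
            (st.1.insert product stripped, st.2.setdefault stripped brand)
          else st
      | none => st)
    (updated_aliases, updated_map)
  (st.1.items, st.2.items)

-- ===== PORT B =====
-- _longest_valid_strip: for length in range(min(len(product), max_len), 1, -1)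
def pvLongestValidStrip (product : List Char) (length : Nat)
    (reverse_brand_map : PySem.Dict String String) : Option (String × String) :=
  if _h : length < 2 then none
  else
    match reverse_brand_map.get? (String.ofList (product.take length)) with
    | some brand =>
        let remainder := (product.drop length).dropWhile pvSep
        if 3 ≤ remainder.length ∧ (remainder.take 3).any PySem.Chars.isalpha then
          some (String.ofList remainder, brand)
        else pvLongestValidStrip product (length - 1) reverse_brand_map
    | none => pvLongestValidStrip product (length - 1) reverse_brand_map
  termination_by length
  decreasing_by all_goals omega

def strip_brand_prefixes_alt (product_aliases : List (String × String)) (product_brand_map : List (String × String)) (reverse_brand_map : List (String × String)) : (List (String × String)) × (List (String × String)) :=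
  let updated_aliases := PySem.Dict.ofList product_aliases
  let updated_map := PySem.Dict.ofList product_brand_map
  let rmap := PySem.Dict.ofList reverse_brand_map
  let max_len := rmap.keys.foldl (fun acc b => max acc b.toList.length) 0
  -- for product in dict.fromkeys(updated_aliases.values())
  let st := (PySem.List.dedup updated_aliases.values).foldl
    (fun st product =>
      match pvLongestValidStrip product.toList (min product.toList.length max_len) rmap with
      | some (stripped, brand) =>
          (st.1.insert product stripped,
           if st.2.contains stripped then st.2 else st.2.insert stripped brand)
      | none => st)
    (updated_aliases, updated_map)
  (st.1.items, st.2.items)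

-- ===== PRECONDITION & SPEC =====
-- the "brand b strips product v to remainder r" relation, used only to state Pre_
def pvStripRem (v b : List Char) : Option (List Char) :=
  if 2 ≤ b.length ∧ b <+: v then
    let r := (v.drop b.length).dropWhile pvSep
    if 3 ≤ r.length ∧ (r.take 3).any PySem.Chars.isalpha then some r else none
  else none

-- Pre_ excludes inputs where two distinct product names can strip (via some brand names) to the
-- same remainder while those brand names map to different canonical brands: there the winner of
-- updated_map.setdefault depends on Python's per-run set iteration order, so neither value is
-- the specified one.
def Pre_strip_brand_prefixes (product_aliases : List (String × String)) (product_brand_map : List (String × String)) (reverse_brand_map : List (String × String)) : Prop :=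
  ∀ v1 ∈ product_aliases.map (·.2), ∀ v2 ∈ product_aliases.map (·.2),
  ∀ b1 ∈ reverse_brand_map.map (·.1), ∀ b2 ∈ reverse_brand_map.map (·.1),
    v1 ≠ v2 →
    pvStripRem v1.toList b1.toList ≠ none →
    pvStripRem v1.toList b1.toList = pvStripRem v2.toList b2.toList →
    (PySem.Dict.ofList reverse_brand_map).getD b1 "" = (PySem.Dict.ofList reverse_brand_map).getD b2 ""
instance (product_aliases : List (String × String)) (product_brand_map : List (String × String)) (reverse_brand_map : List (String × String)) : Decidable (Pre_strip_brand_prefixes product_aliases product_brand_map reverse_brand_map) := by unfold Pre_strip_brand_prefixes; infer_instance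

def pvWitness_strip_brand_prefixes : (List (String × String)) × (List (String × String)) × (List (String × String)) :=
  ([("k", "ab foo")], [], [("ab", "X")])

def Spec_strip_brand_prefixes (product_aliases : List (String × String)) (product_brand_map : List (String × String)) (reverse_brand_map : List (String × String)) (out : (List (String × String)) × (List (String × String))) : Prop := out = strip_brand_prefixes_alt product_aliases product_brand_map reverse_brand_map
instance (product_aliases : List (String × String)) (product_brand_map : List (String × String)) (reverse_brand_map : List (String × String)) (out : (List (String × String)) × (List (String × String))) : Decidable (Spec_strip_brand_prefixes product_aliases product_brand_map reverse_brand_map out) := by unfold Spec_strip_brand_prefixes; infer_instance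

-- ===== CLAIM (what is proved, stated in full; the proofs are below) =====
def Claim_equal_strip_brand_prefixes : Prop := ∀ (product_aliases : List (String × String)) (product_brand_map : List (String × String)) (reverse_brand_map : List (String × String)), Dom_strip_brand_prefixes product_aliases product_brand_map reverse_brand_map → Pre_strip_brand_prefixes product_aliases product_brand_map reverse_brand_map → Spec_strip_brand_prefixes product_aliases product_brand_map reverse_brand_map (strip_brand_prefixes product_aliases product_brand_map reverse_brand_map)

-- ===== LEMMAS AND PROOFS =====

-- the remainder left after stripping a prefix of n characters
def pvRem (p : List Char) (n : Nat) : List Char := (p.drop n).dropWhile pvSep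

def pvValid (r : List Char) : Bool := decide (3 ≤ r.length) && (r.take 3).any PySem.Chars.isalpha

-- "brand b fires for product p" in A's scan
def pvGood (p : List Char) (b : String) : Bool :=
  decide (2 ≤ b.toList.length) && PySem.Chars.startswith p b.toList && pvValid (pvRem p b.toList.length)

-- "a brand of exactly length L fires for p" in B's descent
def pvCond (p : List Char) (d : PySem.Dict String String) (L : Nat) : Bool :=
  (d.get? (String.ofList (p.take L))).isSome && pvValid (pvRem p L)

theorem pvIsValidRemainder_eq (r : List Char) : pvIsValidRemainder r = pvValid r := by
  unfold pvIsValidRemainder pvValid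
  by_cases h : r.length < 3 <;> simp [h] <;> omega

theorem pvValid_iff (r : List Char) :
    (3 ≤ r.length ∧ (r.take 3).any PySem.Chars.isalpha) ↔ pvValid r = true := by
  unfold pvValid
  simp

theorem pvRem_fold (p : List Char) (n : Nat) :
    List.dropWhile pvSep (List.drop n p) = pvRem p n := rfl

theorem pvRem_ne_self (p : List Char) (n : Nat) (h2 : 2 ≤ n) (hle : n ≤ p.length)
    (h3 : 3 ≤ (pvRem p n).length) : pvRem p n ≠ p := by
  intro he
  have hd : (pvRem p n).length ≤ (p.drop n).length := List.length_dropWhile_le _ _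
  rw [List.length_drop] at hd
  rw [he] at h3 hd
  omega

theorem pvValid_length (r : List Char) (h : pvValid r = true) : 3 ≤ r.length := by
  unfold pvValid at h
  simp at h
  exact h.1

theorem pvTryStripBrand_eq_find (p : List Char) (d : PySem.Dict String String) (l : List String) :
    pvTryStripBrand p l d
      = (l.find? (pvGood p)).map
          (fun b => (String.ofList (pvRem p b.toList.length), (d.get? b).getD "")) := by
  induction l with
  | nil => rfl
  | cons b rest ih =>
    rw [pvTryStripBrand, List.find?_cons]
    by_cases hlen : b.toList.length < 2
    · have hg : pvGood p b = false := by
        unfold pvGood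
        rw [decide_eq_false (by omega : ¬ 2 ≤ b.toList.length)]
        simp
      rw [if_pos hlen, ih, hg]
    · rw [if_neg hlen]
      by_cases hsw : PySem.Chars.startswith p b.toList = true
      · have hpre : b.toList <+: p := (PySem.Chars.startswith_iff _ _).mp hsw
        have hble : b.toList.length ≤ p.length := hpre.length_le
        rw [hsw]
        simp only [Bool.not_true, pvRem_fold]
        rw [if_neg (by simp)]
        by_cases hval : pvValid (pvRem p b.toList.length) = true
        · have hg : pvGood p b = true := by
            unfold pvGood
            rw [decide_eq_true (by omega : 2 ≤ b.toList.length), hsw, hval]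
            rfl
          have h3 := pvValid_length _ hval
          rw [if_pos ⟨(by intro he; rw [he] at h3; simp at h3),
              pvRem_ne_self p _ (by omega) hble h3,
              (by rw [pvIsValidRemainder_eq]; exact hval)⟩, hg]
          rfl
        · have hg : pvGood p b = false := by
            unfold pvGood
            rw [eq_false_of_ne_true hval]
            simp
          rw [if_neg (by
              rw [pvIsValidRemainder_eq]
              intro hc
              exact hval hc.2.2), hg, ih]
      · have hg : pvGood p b = false := by
          unfold pvGood
          rw [eq_false_of_ne_true hsw]
          simp
        rw [eq_false_of_ne_true hsw]
        simp only [Bool.not_false]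
        rw [if_pos trivial, hg, ih]

theorem pvFind_pairwise_max {α : Type} (key : α → Nat) (q : α → Bool) (l : List α) (b : α)
    (hp : l.Pairwise (fun a b => key b ≤ key a)) (hf : l.find? q = some b) :
    ∀ x ∈ l, q x → key x ≤ key b := by
  induction l with
  | nil => simp at hf
  | cons a t ih =>
    rw [List.pairwise_cons] at hp
    rw [List.find?_cons] at hf
    by_cases ha : q a
    · simp [ha] at hf
      subst hf
      intro x hx _
      rcases List.mem_cons.mp hx with rfl | hx
      · exact le_refl _
      · exact hp.1 x hx
    · simp [ha] at hf
      intro x hx hqx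
      rcases List.mem_cons.mp hx with rfl | hx
      · simp [hqx] at ha
      · exact ih hp.2 hf x hx hqx

theorem pvLongestValidStrip_eq_none (p : List Char) (d : PySem.Dict String String) (L : Nat)
    (h : ∀ L', 2 ≤ L' → L' ≤ L → pvCond p d L' = false) :
    pvLongestValidStrip p L d = none := by
  induction L using Nat.strong_induction_on with
  | _ L ih =>
    rw [pvLongestValidStrip]
    by_cases hL : L < 2
    · rw [dif_pos hL]
    · rw [dif_neg hL]
      have hc := h L (by omega) le_rfl
      unfold pvCond at hc
      cases hget : d.get? (String.ofList (p.take L)) with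
      | none =>
        exact ih (L - 1) (by omega) (fun L' h2 hle => h L' h2 (by omega))
      | some brand =>
        rw [hget] at hc
        simp only [Option.isSome_some, Bool.true_and] at hc
        dsimp only
        rw [if_neg (by
          rw [pvValid_iff]
          simp [pvRem] at hc
          simp [hc])]
        exact ih (L - 1) (by omega) (fun L' h2 hle => h L' h2 (by omega))

theorem pvLongestValidStrip_eq_some (p : List Char) (d : PySem.Dict String String) (L L₀ : Nat)
    (br : String)
    (h2 : 2 ≤ L₀) (hle : L₀ ≤ L)
    (habove : ∀ L', L₀ < L' → L' ≤ L → pvCond p d L' = false)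
    (hget : d.get? (String.ofList (p.take L₀)) = some br)
    (hval : pvValid (pvRem p L₀) = true) :
    pvLongestValidStrip p L d = some (String.ofList (pvRem p L₀), br) := by
  induction L using Nat.strong_induction_on with
  | _ L ih =>
    rw [pvLongestValidStrip]
    rw [dif_neg (by omega : ¬ L < 2)]
    by_cases heq : L = L₀
    · subst heq
      rw [hget]
      dsimp only
      rw [if_pos (by rw [pvValid_iff]; exact hval)]
      rfl
    · have hLgt : L₀ < L := by omega
      have hc := habove L hLgt le_rfl
      unfold pvCond at hc
      cases hget' : d.get? (String.ofList (p.take L)) with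
      | none =>
        exact ih (L - 1) (by omega) (by omega) (fun L' hgt hle' => habove L' hgt (by omega))
      | some brand =>
        rw [hget'] at hc
        simp only [Option.isSome_some, Bool.true_and] at hc
        dsimp only
        rw [if_neg (by rw [pvValid_iff]; simp [pvRem] at hc ⊢; simp [hc])]
        exact ih (L - 1) (by omega) (by omega) (fun L' hgt hle' => habove L' hgt (by omega))

theorem pvGet?_isSome_iff_mem_keys (d : PySem.Dict String String) (k : String) :
    (d.get? k).isSome = true ↔ k ∈ d.keys := by
  rw [Option.isSome_iff_ne_none]
  rw [ne_eq, PySem.Dict.get?_eq_none_iff_not_mem_keys]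
  simp

theorem pvCond_true_good (p : List Char) (d : PySem.Dict String String) (L : Nat)
    (hLp : L ≤ p.length) (h2 : 2 ≤ L) (hc : pvCond p d L = true) :
    String.ofList (p.take L) ∈ d.keys ∧ pvGood p (String.ofList (p.take L)) = true ∧
      (String.ofList (p.take L)).toList.length = L := by
  unfold pvCond at hc
  rw [Bool.and_eq_true] at hc
  have hmem := (pvGet?_isSome_iff_mem_keys d _).mp hc.1
  have htl : (String.ofList (p.take L)).toList = p.take L := by simp
  have hlen : (String.ofList (p.take L)).toList.length = L := by
    rw [htl, List.length_take]
    omega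
  refine ⟨hmem, ?_, hlen⟩
  unfold pvGood
  rw [hlen, htl]
  rw [decide_eq_true h2]
  rw [(PySem.Chars.startswith_iff _ _).mpr (List.take_prefix L p)]
  rw [hc.2]
  rfl

theorem pvInner_eq (p : List Char) (d : PySem.Dict String String) :
    pvTryStripBrand p (PySem.List.sorted d.keys (fun s => s.toList.length) true) d
      = pvLongestValidStrip p (min p.length (d.keys.foldl (fun acc b => max acc b.toList.length) 0)) d := by
  rw [pvTryStripBrand_eq_find]
  cases hf : (PySem.List.sorted d.keys (fun s => s.toList.length) true).find? (pvGood p) with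
  | none =>
    have hnone : ∀ x ∈ d.keys, ¬ pvGood p x = true := by
      intro x hx
      exact List.find?_eq_none.mp hf x ((PySem.List.mem_sorted _ _ _ _).mpr hx)
    rw [Option.map_none]
    symm
    apply pvLongestValidStrip_eq_none
    intro L' h2 hle
    by_contra hne
    have hc : pvCond p d L' = true := by
      cases hcv : pvCond p d L' with
      | false => exact absurd hcv hne
      | true => rfl
    have hLp : L' ≤ p.length := le_trans hle (Nat.min_le_left _ _)
    obtain ⟨hmem, hgood, _⟩ := pvCond_true_good p d L' hLp h2 hc
    exact hnone _ hmem hgood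
  | some b =>
    have hgood : pvGood p b = true := List.find?_some hf
    have hmem : b ∈ d.keys :=
      (PySem.List.mem_sorted _ _ _ _).mp (List.mem_of_find?_eq_some hf)
    have hmax : ∀ x ∈ d.keys, pvGood p x → x.toList.length ≤ b.toList.length := by
      intro x hx hqx
      exact pvFind_pairwise_max (fun s => s.toList.length) (pvGood p) _ b
        (PySem.List.sorted_pairwise_rev d.keys (fun s => s.toList.length)) hf x
        ((PySem.List.mem_sorted _ _ _ _).mpr hx) hqx
    have hg2 : 2 ≤ b.toList.length ∧ PySem.Chars.startswith p b.toList = true ∧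
        pvValid (pvRem p b.toList.length) = true := by
      unfold pvGood at hgood
      simp only [Bool.and_eq_true, decide_eq_true_eq] at hgood
      exact ⟨hgood.1.1, hgood.1.2, hgood.2⟩
    have hpre : b.toList <+: p := (PySem.Chars.startswith_iff _ _).mp hg2.2.1
    have hble : b.toList.length ≤ p.length := hpre.length_le
    have htake : p.take b.toList.length = b.toList := (List.prefix_iff_eq_take.mp hpre).symm
    have hofl : String.ofList (p.take b.toList.length) = b := by rw [htake]; simp
    have hbmax : b.toList.length ≤ d.keys.foldl (fun acc b => max acc b.toList.length) 0 :=
      (PySem.List.le_foldl_max_nat d.keys (fun b => b.toList.length) 0).2 b hmem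
    have hsome : (d.get? b).isSome = true := (pvGet?_isSome_iff_mem_keys d b).mpr hmem
    have hget : d.get? (String.ofList (p.take b.toList.length)) = some ((d.get? b).getD "") := by
      rw [hofl]
      cases hgb : d.get? b with
      | none => rw [hgb] at hsome; simp at hsome
      | some v => rfl
    rw [Option.map_some]
    symm
    apply pvLongestValidStrip_eq_some p d _ b.toList.length ((d.get? b).getD "")
      hg2.1 (le_min hble hbmax) ?_ hget hg2.2.2
    intro L' hgt hle
    by_contra hne
    have hc : pvCond p d L' = true := by
      cases hcv : pvCond p d L' with
      | false => exact absurd hcv hne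
      | true => rfl
    have hLp : L' ≤ p.length := le_trans hle (Nat.min_le_left _ _)
    obtain ⟨hmem', hgood', hlen'⟩ := pvCond_true_good p d L' hLp (by omega) hc
    have := hmax _ hmem' hgood'
    omega

theorem pvLongestValidStrip_some_len (p : List Char) (d : PySem.Dict String String) (L : Nat)
    (s br : String) (h : pvLongestValidStrip p L d = some (s, br)) : 3 ≤ s.toList.length := by
  induction L using Nat.strong_induction_on with
  | _ L ih =>
    rw [pvLongestValidStrip] at h
    by_cases hL : L < 2
    · rw [dif_pos hL] at h; simp at h
    · rw [dif_neg hL] at h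
      cases hget : d.get? (String.ofList (p.take L)) with
      | none =>
        rw [hget] at h
        exact ih (L - 1) (by omega) h
      | some brand =>
        rw [hget] at h
        dsimp only at h
        by_cases hcond : 3 ≤ (List.dropWhile pvSep (List.drop L p)).length ∧
            ((List.dropWhile pvSep (List.drop L p)).take 3).any PySem.Chars.isalpha
        · rw [if_pos hcond] at h
          have hs : s = String.ofList (List.dropWhile pvSep (List.drop L p)) := by
            cases h; rfl
          rw [hs]
          simpa using hcond.1
        · rw [if_neg hcond] at h
          exact ih (L - 1) (by omega) h

theorem pvSetdefault_eq_ite (d : PySem.Dict String String) (k v : String) :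
    d.setdefault k v = if d.contains k then d else d.insert k v := by
  by_cases hc : d.contains k = true
  · rw [if_pos hc, PySem.Dict.setdefault_of_contains d v hc]
  · rw [if_neg hc, PySem.Dict.setdefault_of_not_contains d v (by
      cases h : d.contains k with
      | true => exact absurd h hc
      | false => rfl)]

-- ===== VERDICT (by name: the statement is the Claim_ definition above) =====
theorem strip_brand_prefixes_spec : Claim_equal_strip_brand_prefixes := by
  unfold Claim_equal_strip_brand_prefixes
  intro product_aliases product_brand_map reverse_brand_map _hdom _hpre
  unfold Spec_strip_brand_prefixes strip_brand_prefixes strip_brand_prefixes_alt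
  dsimp only
  rw [PySem.List.dedup_eq_ofList]
  have hstep : (fun (st : PySem.Dict String String × PySem.Dict String String) product =>
      match pvTryStripBrand product.toList
          (PySem.List.sorted (PySem.Dict.ofList reverse_brand_map).keys (fun s => s.toList.length) true)
          (PySem.Dict.ofList reverse_brand_map) with
      | some (stripped, brand) =>
          if stripped.toList ≠ [] ∧ 2 ≤ stripped.toList.length then
            (st.1.insert product stripped, st.2.setdefault stripped brand)
          else st
      | none => st)
    = (fun (st : PySem.Dict String String × PySem.Dict String String) product =>
      match pvLongestValidStrip product.toList
          (min product.toList.length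
            ((PySem.Dict.ofList reverse_brand_map).keys.foldl (fun acc b => max acc b.toList.length) 0))
          (PySem.Dict.ofList reverse_brand_map) with
      | some (stripped, brand) =>
          (st.1.insert product stripped,
           if st.2.contains stripped then st.2 else st.2.insert stripped brand)
      | none => st) := by
    funext st product
    rw [pvInner_eq]
    cases hres : pvLongestValidStrip product.toList
        (min product.toList.length
          ((PySem.Dict.ofList reverse_brand_map).keys.foldl (fun acc b => max acc b.toList.length) 0))
        (PySem.Dict.ofList reverse_brand_map) with
    | none => rfl
    | some pr =>
      obtain ⟨stripped, brand⟩ := pr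
      have h3 := pvLongestValidStrip_some_len _ _ _ _ _ hres
      dsimp only
      rw [if_pos ⟨(by intro he; rw [he] at h3; simp at h3), by omega⟩]
      rw [pvSetdefault_eq_ite]
  rw [hstep]
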